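-- pv_equiv track=rewrite | github.com/pypi-data/pypi-mirror-374 | packages/py-autotask/py_autotask-2.0.0.tar.gz/py_autotask-2.0.0/py_autotask/entities/security_policies.py | _generate_audit_recommendations
-- ===== SOURCE A (Python) =====
-- from typing import Any, Dict, List, Optional
--
-- def _generate_audit_recommendations(
--     findings: List[Dict[str, Any]]
-- ) -> List[str]:
--     """Generate audit recommendations based on findings."""
--     recommendations = []
--
--     critical_count = len([f for f in findings if f.get("risk_level") == "Critical"])
--     if critical_count > 0:
--         recommendations.append(
--             f"Immediate action required: {critical_count} critical security findings"
--         )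
--
--     high_count = len([f for f in findings if f.get("risk_level") == "High"])
--     if high_count > 0:
--         recommendations.append(
--             f"Address {high_count} high-risk security issues within 30 days"
--         )
--
--     recommendations.extend(
--         [
--             "Implement automated security monitoring",
--             "Schedule regular security policy reviews",
--             "Enhance security training programs",
--         ]
--     )
--
--     return recommendations
-- ===== SOURCE B (Python) =====
-- from typing import Any, Dict, List, Optional
--
-- def _generate_audit_recommendations(
--     findings: List[Dict[str, Any]]
-- ) -> List[str]:
--     """Generate audit recommendations via a risk-level frequency table and a template table."""
--     counts = {}
--     for f in findings:
--         k = f.get("risk_level")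
--         counts[k] = counts.get(k, 0) + 1
--     templates = [
--         ("Critical", "Immediate action required: ", " critical security findings"),
--         ("High", "Address ", " high-risk security issues within 30 days"),
--     ]
--     return [pre + str(counts.get(key, 0)) + suf
--             for key, pre, suf in templates
--             if counts.get(key, 0) > 0] + [
--         "Implement automated security monitoring",
--         "Schedule regular security policy reviews",
--         "Enhance security training programs",
--     ]
-- ===== Notes on version B (the rewrite author's own statement) =====
-- stated objective: idiomatic
-- what changed: B builds a frequency dictionary over all risk levels in one pass and then drives the two conditional lines from a template table (key, prefix, suffix) with a comprehension, instead of A's two explicit full-list comprehension counts and hand-written append branches.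
import Mathlib
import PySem

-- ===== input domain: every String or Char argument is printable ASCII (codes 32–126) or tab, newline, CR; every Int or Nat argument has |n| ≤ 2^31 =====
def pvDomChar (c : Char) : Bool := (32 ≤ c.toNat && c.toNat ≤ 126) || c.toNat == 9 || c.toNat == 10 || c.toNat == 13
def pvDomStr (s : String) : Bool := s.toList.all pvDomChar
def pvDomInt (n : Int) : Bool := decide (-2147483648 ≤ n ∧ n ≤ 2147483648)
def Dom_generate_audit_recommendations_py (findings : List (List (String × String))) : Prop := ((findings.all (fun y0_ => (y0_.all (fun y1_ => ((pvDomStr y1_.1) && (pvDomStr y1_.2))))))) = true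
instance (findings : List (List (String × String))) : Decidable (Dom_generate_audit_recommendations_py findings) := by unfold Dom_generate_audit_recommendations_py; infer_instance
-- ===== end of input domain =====

-- B replaces A's two full-list comprehension counts and hand-written append branches by a
-- one-pass risk-level frequency dictionary read through a template table (idiomatic; same output).

-- ===== PORT A =====
def generate_audit_recommendations_py (findings : List (List (String × String))) : List String :=
  let recommendations : List String := []
  let critical_count : Int :=
    ((findings.filter (fun f => (PySem.Dict.mk f).get? "risk_level" == some "Critical")).length : Int)
  let recommendations :=
    if critical_count > 0 then
      recommendations ++ ["Immediate action required: " ++ PySem.Int.toStr critical_count ++ " critical security findings"]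
    else recommendations
  let high_count : Int :=
    ((findings.filter (fun f => (PySem.Dict.mk f).get? "risk_level" == some "High")).length : Int)
  let recommendations :=
    if high_count > 0 then
      recommendations ++ ["Address " ++ PySem.Int.toStr high_count ++ " high-risk security issues within 30 days"]
    else recommendations
  recommendations ++
    ["Implement automated security monitoring",
     "Schedule regular security policy reviews",
     "Enhance security training programs"]

-- ===== PORT B =====
def generate_audit_recommendations_py_alt (findings : List (List (String × String))) : List String :=
  let counts : PySem.Dict (Option String) Int :=
    findings.foldl
      (fun d f =>
        let k := (PySem.Dict.mk f).get? "risk_level"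
        d.insert k (d.getD k 0 + 1))
      PySem.Dict.empty
  let templates : List (String × String × String) :=
    [("Critical", "Immediate action required: ", " critical security findings"),
     ("High", "Address ", " high-risk security issues within 30 days")]
  ((templates.filter (fun t => counts.getD (some t.1) 0 > 0)).map
      (fun t => t.2.1 ++ PySem.Int.toStr (counts.getD (some t.1) 0) ++ t.2.2)) ++
    ["Implement automated security monitoring",
     "Schedule regular security policy reviews",
     "Enhance security training programs"]

-- ===== PRECONDITION & SPEC =====
def Spec_generate_audit_recommendations_py (findings : List (List (String × String))) (out : List String) : Prop := out = generate_audit_recommendations_py_alt findings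
instance (findings : List (List (String × String))) (out : List String) : Decidable (Spec_generate_audit_recommendations_py findings out) := by unfold Spec_generate_audit_recommendations_py; infer_instance

-- ===== CLAIM (what is proved, stated in full; the proofs are below) =====
def Claim_equal_generate_audit_recommendations_py : Prop := ∀ (findings : List (List (String × String))), Dom_generate_audit_recommendations_py findings → Spec_generate_audit_recommendations_py findings (generate_audit_recommendations_py findings)

-- ===== LEMMAS AND PROOFS =====

-- The frequency dictionary's entry at any key is that key's occurrence count among the findings' risk levels.
theorem pv_counts_getD (findings : List (List (String × String))) (d : PySem.Dict (Option String) Int)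
    (k : Option String) :
    (findings.foldl
      (fun d f =>
        let k := (PySem.Dict.mk f).get? "risk_level"
        d.insert k (d.getD k 0 + 1))
      d).getD k 0
    = d.getD k 0 + ((findings.filter (fun f => (PySem.Dict.mk f).get? "risk_level" == k)).length : Int) := by
  induction findings generalizing d with
  | nil => simp
  | cons f rest ih =>
    simp only [List.foldl_cons, List.filter_cons, ih]
    by_cases h : ((PySem.Dict.mk f).get? "risk_level" == k) = true
    · have hk : (PySem.Dict.mk f).get? "risk_level" = k := by simpa using h
      simp [hk]
      omega
    · have hk : ¬ k = (PySem.Dict.mk f).get? "risk_level" := by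
        intro hkk; exact h (by simp [hkk])
      simp [h, PySem.Dict.getD_insert, hk]

-- ===== VERDICT (by name: the statement is the Claim_ definition above) =====
theorem generate_audit_recommendations_py_spec : Claim_equal_generate_audit_recommendations_py := by
  intro findings _
  show _ = _
  unfold generate_audit_recommendations_py generate_audit_recommendations_py_alt
  simp only [List.filter_cons, List.filter_nil, pv_counts_getD, PySem.Dict.getD_empty, zero_add]
  generalize hC : ((findings.filter (fun f => (PySem.Dict.mk f).get? "risk_level" == some "Critical")).length : Int) = c
  generalize hH : ((findings.filter (fun f => (PySem.Dict.mk f).get? "risk_level" == some "High")).length : Int) = h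
  by_cases hc : (0:Int) < c <;> by_cases hh : (0:Int) < h <;> simp [hc, hh, hC, hH]
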